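-- pv_equiv track=rewrite | github.com/nscharioth/emanuelvogt | scripts/18_analyze_musicxml_instruments.py | normalize_instrument_name
-- ===== SOURCE A (Python) =====
-- def normalize_instrument_name(name):
--     """Normalize instrument names for mapping."""
--     if not name:
--         return "Unknown"
--
--     name = name.strip().lower()
--
--     # Common abbreviations
--     abbrev_map = {
--         'kl.': 'klavier',
--         'kl': 'klavier',
--         's.': 'sopran',
--         's': 'sopran',
--         'a.': 'alt',
--         'a': 'alt',
--         't.': 'tenor',
--         't': 'tenor',
--         'b.': 'bass',
--         'b': 'bass',
--         'instr.': 'instrument',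
--     }
--
--     for abbrev, full in abbrev_map.items():
--         if name == abbrev or name.startswith(abbrev + ' '):
--             return full
--
--     return name
-- ===== SOURCE B (Python) =====
-- BASE_MAP = {'kl': 'klavier', 's': 'sopran', 'a': 'alt', 't': 'tenor', 'b': 'bass'}
-- ABBREV_MAP = {**{k + '.': v for k, v in BASE_MAP.items()}, **BASE_MAP, 'instr.': 'instrument'}
--
--
-- def normalize_instrument_name(name):
--     """Normalize instrument names for mapping."""
--     if not name:
--         return "Unknown"
--     s = name.strip().lower()
--     first = s.partition(' ')[0]
--     return ABBREV_MAP.get(first, s)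
-- ===== Notes on version B (the rewrite author's own statement) =====
-- stated objective: idiomatic
-- what changed: Replaces the linear scan over the abbreviation map (per-key equality and startswith tests) with a single dict lookup keyed by the text before the first space (str.partition), the dict itself being derived from a 5-entry base map instead of spelled out.
import Mathlib
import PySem

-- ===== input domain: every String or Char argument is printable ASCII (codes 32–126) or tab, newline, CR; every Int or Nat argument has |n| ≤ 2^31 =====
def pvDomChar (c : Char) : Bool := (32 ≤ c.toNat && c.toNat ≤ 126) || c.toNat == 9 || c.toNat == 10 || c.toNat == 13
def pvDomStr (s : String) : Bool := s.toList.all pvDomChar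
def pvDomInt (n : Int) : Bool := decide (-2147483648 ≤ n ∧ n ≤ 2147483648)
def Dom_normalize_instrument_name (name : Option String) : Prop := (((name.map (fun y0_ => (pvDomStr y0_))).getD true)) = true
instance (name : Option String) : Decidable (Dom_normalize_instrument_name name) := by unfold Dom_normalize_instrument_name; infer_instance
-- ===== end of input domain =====

-- B replaces A's linear scan of the abbreviation map with one dict lookup on the text before the
-- first space (str.partition); the dict is derived from a 5-entry base map instead of spelled out.
-- ===== PORT A =====
def pvAbbrevPairs : List (String × String) :=
  [("kl.", "klavier"), ("kl", "klavier"), ("s.", "sopran"), ("s", "sopran"),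
   ("a.", "alt"), ("a", "alt"), ("t.", "tenor"), ("t", "tenor"),
   ("b.", "bass"), ("b", "bass"), ("instr.", "instrument")]

-- A's `for abbrev, full in abbrev_map.items():` loop
def pvLoopA (s : String) : List (String × String) → String
  | [] => s
  | (ab, full) :: rest =>
      if s == ab || PySem.Str.startswith s (ab ++ " ") then full else pvLoopA s rest

def normalize_instrument_name (name : Option String) : String :=
  match name with
  | none => "Unknown"
  | some n =>
      if n == "" then "Unknown"
      else
        let s := PySem.Str.lower (PySem.Str.strip n)
        pvLoopA s pvAbbrevPairs

-- ===== PORT B =====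
def pvBaseMap : List (String × String) :=
  [("kl", "klavier"), ("s", "sopran"), ("a", "alt"), ("t", "tenor"), ("b", "bass")]

-- {**{k+'.': v for k, v in BASE_MAP.items()}, **BASE_MAP, 'instr.': 'instrument'}
def pvAbbrevDict : PySem.Dict String String :=
  PySem.Dict.ofList (pvBaseMap.map (fun p => (p.1 ++ ".", p.2)) ++ pvBaseMap ++ [("instr.", "instrument")])

def normalize_instrument_name_alt (name : Option String) : String :=
  match name with
  | none => "Unknown"
  | some n =>
      if n == "" then "Unknown"
      else
        let s := PySem.Str.lower (PySem.Str.strip n)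
        -- s.partition(' ')[0]: the prefix of s before the first space (exact hand port)
        let first := String.ofList (s.toList.takeWhile (fun c => c != ' '))
        PySem.Dict.getD pvAbbrevDict first s

-- ===== PRECONDITION & SPEC =====
def Spec_normalize_instrument_name (name : Option String) (out : String) : Prop := out = normalize_instrument_name_alt name
instance (name : Option String) (out : String) : Decidable (Spec_normalize_instrument_name name out) := by unfold Spec_normalize_instrument_name; infer_instance

-- ===== CLAIM (what is proved, stated in full; the proofs are below) =====
def Claim_equal_normalize_instrument_name : Prop := ∀ (name : Option String), Dom_normalize_instrument_name name → Spec_normalize_instrument_name name (normalize_instrument_name name)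

-- ===== LEMMAS AND PROOFS =====

lemma key_match (k : List Char) (hk : (' ' : Char) ∉ k) (l : List Char) :
    (l = k ∨ (k ++ [' ']) <+: l) ↔ l.takeWhile (fun c => c != ' ') = k := by
  induction k generalizing l with
  | nil =>
    cases l with
    | nil => simp
    | cons c rest =>
      by_cases hc : c = ' '
      · subst hc; simp [List.cons_prefix_cons]
      · have hct : (c != ' ') = true := by simpa using hc
        simp [List.cons_prefix_cons, hct, Ne.symm hc]
  | cons c k' ih =>
    have hc : c ≠ ' ' := fun h => hk (by simp [h])
    have hk' : (' ' : Char) ∉ k' := fun h => hk (List.mem_cons_of_mem _ h)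
    cases l with
    | nil => simp
    | cons d rest =>
      by_cases hd : d = ' '
      · subst hd
        simp [List.cons_prefix_cons, hc, Ne.symm hc]
      · have hdt : (d != ' ') = true := by simpa using hd
        simp only [List.cons_append, List.cons_prefix_cons, List.takeWhile_cons, hdt, if_true,
          List.cons.injEq]
        by_cases hdc : d = c
        · subst hdc
          rw [← ih hk' rest]
          simp
        · simp [hdc, Ne.symm hdc]

-- A's per-key test holds exactly when the text before the first space equals the key (keys contain no space)
lemma cond_eq (s k : String) (hk : (' ' : Char) ∉ k.toList) :
    (s == k || PySem.Str.startswith s (k ++ " ")) =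
      (s.toList.takeWhile (fun c => c != ' ') == k.toList) := by
  rw [Bool.eq_iff_iff]
  simp only [Bool.or_eq_true, beq_iff_eq, PySem.Str.startswith_eq, PySem.Chars.startswith_iff]
  rw [← key_match k.toList hk s.toList]
  have h1 : (k ++ " ").toList = k.toList ++ [' '] := by simp
  rw [h1]
  exact or_congr String.toList_inj.symm Iff.rfl

-- ===== VERDICT (by name: the statement is the Claim_ definition above) =====
set_option maxHeartbeats 4000000 in
theorem normalize_instrument_name_spec : Claim_equal_normalize_instrument_name := by
  intro name _
  unfold Spec_normalize_instrument_name normalize_instrument_name normalize_instrument_name_alt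
  cases name with
  | none => rfl
  | some n =>
    by_cases hn : n == ""
    · simp [hn]
    · simp only [hn, Bool.false_eq_true, if_false]
      set s := PySem.Str.lower (PySem.Str.strip n) with hs
      set t := s.toList.takeWhile (fun c => c != ' ') with ht
      have hkey : ∀ k : String, (k == String.ofList t) = (t == k.toList) := by
        intro k
        rw [Bool.eq_iff_iff, beq_iff_eq, beq_iff_eq, ← String.toList_inj]
        simp [eq_comm]
      have hd : pvAbbrevDict = PySem.Dict.mk
          [("kl.", "klavier"), ("s.", "sopran"), ("a.", "alt"), ("t.", "tenor"), ("b.", "bass"),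
           ("kl", "klavier"), ("s", "sopran"), ("a", "alt"), ("t", "tenor"), ("b", "bass"),
           ("instr.", "instrument")] := by decide
      rw [hd]
      simp only [pvLoopA, pvAbbrevPairs]
      simp only [PySem.Dict.getD, PySem.Dict.get?_mk_cons]
      rw [cond_eq s "kl." (by decide), cond_eq s "kl" (by decide),
        cond_eq s "s." (by decide), cond_eq s "s" (by decide),
        cond_eq s "a." (by decide), cond_eq s "a" (by decide),
        cond_eq s "t." (by decide), cond_eq s "t" (by decide),
        cond_eq s "b." (by decide), cond_eq s "b" (by decide),
        cond_eq s "instr." (by decide)]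
      simp only [← ht, hkey]
      simp only [apply_ite (fun o : Option String => o.getD s), Option.getD_some]
      have hnil : (PySem.Dict.mk ([] : List (String × String))).get? (String.ofList t) = none := rfl
      rw [hnil]
      split_ifs <;> first | rfl | simp_all
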